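-- pv_equiv track=rewrite | github.com/varhenn/adventofcode-python | year2023/day13/puzzles.py | first_puzzle
-- ===== SOURCE A (Python) =====
-- def first_puzzle(patterns: list[list[str]], errors: int = 0) -> int:
--     def calc(p) -> int:
--         for i in range(1, len(p)):
--             chars = (cs for ls in zip(p[i-1::-1], p[i:]) for cs in zip(*ls))
--             if sum(c1 != c2 for c1, c2 in chars) == errors:
--                 return i
--         return 0
--
--     return sum(100 * calc(p) + calc(list(zip(*p))) for p in patterns)
-- ===== SOURCE B (Python) =====
-- def first_puzzle(patterns: list[list[str]], errors: int = 0) -> int: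
--     def calc(p) -> int:
--         n = len(p)
--         # stage 1: bucket every pairwise row Hamming distance by its index-sum diagonal
--         diag = [0] * (2 * n)
--         for a in range(n):
--             for b in range(a + 1, n, 2):  # only odd index sums can face a mirror
--                 diag[a + b] += sum(x != y for x, y in zip(p[a], p[b]))
--         # stage 2: a mirror before row i pairs exactly the rows with index sum 2*i - 1
--         for i in range(1, n):
--             if diag[2 * i - 1] == errors:
--                 return i
--         return 0
--
--     return sum(100 * calc(p) + calc(list(zip(*p))) for p in patterns)
-- ===== Notes on version B (the rewrite author's own statement) =====
-- stated objective: alternative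
-- what changed: B replaces A's per-split reflected-pair rescans by a two-stage scheme: one pass over the row pairs with odd index sum buckets each pair's Hamming distance into a diagonal table indexed by the row-index sum, then each candidate mirror line is decided by a single table lookup diag[2*i-1] == errors (a mirror before row i pairs exactly the rows whose indices sum to 2*i-1).
import Mathlib
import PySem

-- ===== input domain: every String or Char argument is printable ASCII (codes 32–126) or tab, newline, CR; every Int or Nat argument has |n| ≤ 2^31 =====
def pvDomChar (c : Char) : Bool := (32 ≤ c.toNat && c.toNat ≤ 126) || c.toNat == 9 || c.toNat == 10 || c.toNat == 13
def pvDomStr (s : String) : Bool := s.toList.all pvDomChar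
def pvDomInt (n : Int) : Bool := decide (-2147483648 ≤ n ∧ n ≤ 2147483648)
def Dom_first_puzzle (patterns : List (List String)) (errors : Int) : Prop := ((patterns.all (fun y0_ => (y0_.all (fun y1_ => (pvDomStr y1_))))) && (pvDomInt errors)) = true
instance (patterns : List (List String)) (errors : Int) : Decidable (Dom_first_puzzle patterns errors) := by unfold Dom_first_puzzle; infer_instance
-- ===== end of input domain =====

-- B replaces A's per-split rescans by a two-stage scheme: one pass bucketing every
-- pairwise row-Hamming distance into a diagonal table indexed by the row-index sum,
-- then a table lookup per candidate mirror line (alternative decomposition, same cost).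

-- ===== PORT A =====
-- inner generator: sum(c1 != c2 for ls in zip(p[i-1::-1], p[i:]) for c1, c2 in zip(*ls))
def pvMixA (q : List (List Char)) (i : Int) : Int :=
  (((PySem.List.slice? q (some (i - 1)) none (-1)).getD []).zip (PySem.List.slice q (some i) none)).foldl
    (fun acc ls => (ls.1.zip ls.2).foldl (fun a cs => a + (if cs.1 ≠ cs.2 then (1 : Int) else 0)) acc) 0

-- 'for i in range(1, len(p)): … return i / return 0'
def pvCalcALoop (q : List (List Char)) (errors : Int) : List Int → Int
  | [] => 0
  | i :: rest => if pvMixA q i = errors then i else pvCalcALoop q errors rest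

def pvCalcA (q : List (List Char)) (errors : Int) : Int :=
  pvCalcALoop q errors (PySem.List.pyRange 1 q.length 1)

-- list(zip(*p)), used verbatim by BOTH Pythons: truncates to the shortest row;
-- j < min length so getD never defaults (exact)
def pvZipStar (rows : List (List Char)) : List (List Char) :=
  match rows.map List.length with
  | [] => []
  | l :: ls => (List.range (ls.foldl min l)).map (fun j => rows.map (fun r => r.getD j ' '))

def first_puzzle (patterns : List (List String)) (errors : Int) : Int :=
  (patterns.map (fun p =>
    100 * pvCalcA (p.map String.toList) errors
      + pvCalcA (pvZipStar (p.map String.toList)) errors)).sum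

-- ===== PORT B =====
-- sum(x != y for x, y in zip(p[a], p[b]))
def pvHamB (r s : List Char) : Int :=
  (r.zip s).foldl (fun a cs => a + (if cs.1 ≠ cs.2 then (1 : Int) else 0)) 0

-- stage 1: diag = [0]*(2n); for a in range(n): for b in range(a+1, n, 2): diag[a+b] += ham
def pvDiagB (q : List (List Char)) : List Int :=
  (List.range q.length).foldl (fun d a =>
    (List.range' (a + 1) ((q.length - (a + 1) + 1) / 2) 2).foldl (fun d b =>
      d.set (a + b) (d.getD (a + b) 0 + pvHamB (q.getD a []) (q.getD b []))) d)
    (List.replicate (2 * q.length) 0)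

-- stage 2: for i in range(1, n): if diag[2*i-1] == errors: return i / return 0
def pvScanDiag (diag : List Int) (errors : Int) : List Nat → Int
  | [] => 0
  | i :: rest => if diag.getD (2 * i - 1) 0 = errors then (i : Int) else pvScanDiag diag errors rest

def pvCalcB (q : List (List Char)) (errors : Int) : Int :=
  pvScanDiag (pvDiagB q) errors (List.range' 1 (q.length - 1))

def first_puzzle_alt (patterns : List (List String)) (errors : Int) : Int :=
  (patterns.map (fun p =>
    100 * pvCalcB (p.map String.toList) errors
      + pvCalcB (pvZipStar (p.map String.toList)) errors)).sum

-- ===== PRECONDITION & SPEC =====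
def Spec_first_puzzle (patterns : List (List String)) (errors : Int) (out : Int) : Prop := out = first_puzzle_alt patterns errors
instance (patterns : List (List String)) (errors : Int) (out : Int) : Decidable (Spec_first_puzzle patterns errors out) := by unfold Spec_first_puzzle; infer_instance

-- ===== CLAIM (what is proved, stated in full; the proofs are below) =====
def Claim_equal_first_puzzle : Prop := ∀ (patterns : List (List String)) (errors : Int), Dom_first_puzzle patterns errors → Spec_first_puzzle patterns errors (first_puzzle patterns errors)

-- ===== LEMMAS AND PROOFS =====

-- q[j::-1] = reverse of the first j+1 rows (j < len q)
theorem pvSliceRev (q : List (List Char)) (j : Nat) (h : j < q.length) :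
    PySem.List.slice? q (some (j : Int)) none (-1) = some ((q.take (j + 1)).reverse) := by
  unfold PySem.List.slice? PySem.List.sliceIndices
  norm_num
  have h0 : ¬((j : Int) < 0) := by omega
  have hmin : min ((j : Int)) ((q.length : Int) - 1) = (j : Int) := by omega
  have h1 : (-1 : Int) < (j : Int) := by omega
  simp only [if_neg h0, hmin, if_pos h1]
  have h2 : ((j : Int) + 1).toNat = j + 1 := by omega
  rw [h2]
  rw [List.filterMap_congr (g := fun x => some (q.getD (j - x) [])) ?_]
  · rw [show (fun x => some (q.getD (j - x) [])) = some ∘ (fun x => q.getD (j - x) []) from rfl,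
      List.filterMap_eq_map]
    apply List.ext_getElem
    · simp
      omega
    · intro i h1' h2'
      simp only [List.getElem_map, List.getElem_range, List.getElem_reverse, List.getElem_take]
      rw [List.getD_eq_getElem _ _ (by omega)]
      congr 1
      simp only [List.length_take, List.length_map, List.length_range] at h1' h2' ⊢
      omega
  · intro x hx
    rw [List.mem_range] at hx
    have hxt : ((j : Int) + -(x : Int)).toNat = j - x := by omega
    rw [hxt, List.getElem?_eq_getElem (by omega)]
    simp only []
    rw [List.getD_eq_getElem _ _ (by omega)]

-- zip(reverse(take i), drop i) written by indices
theorem pvZipRevTakeDrop (q : List (List Char)) (j : Nat) (h : j ≤ q.length) :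
    ((q.take j).reverse).zip (q.drop j) =
      (List.range (min j (q.length - j))).map
        (fun k => (q.getD (j - 1 - k) [], q.getD (j + k) [])) := by
  apply List.ext_getElem
  · simp
  · intro i h1 h2
    simp only [List.getElem_zip, List.getElem_map, List.getElem_range,
      List.getElem_reverse, List.getElem_take, List.getElem_drop]
    have hi : i < min j (q.length - j) := by simpa using h2
    rw [List.getD_eq_getElem q [] (by omega), List.getD_eq_getElem q [] (by omega)]
    simp only [Prod.mk.injEq]
    refine ⟨?_, trivial⟩
    congr 1
    simp only [List.length_take]
    omega

theorem pvMixABody :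
    (fun (acc : Int) (ls : List Char × List Char) =>
      (ls.1.zip ls.2).foldl (fun a cs => a + (if cs.1 ≠ cs.2 then (1 : Int) else 0)) acc)
      = (fun acc ls => acc + pvHamB ls.1 ls.2) := by
  funext acc ls
  unfold pvHamB
  rw [PySem.List.foldl_add, PySem.List.foldl_add]
  ring

theorem pvMixA_eq (q : List (List Char)) (j : Nat) (h1 : 1 ≤ j) (h2 : j < q.length) :
    pvMixA q (j : Int) =
      ((List.range (min j (q.length - j))).map
        (fun k => pvHamB (q.getD (j - 1 - k) []) (q.getD (j + k) []))).sum := by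
  unfold pvMixA
  have hj' : (j : Int) - 1 = ((j - 1 : Nat) : Int) := by omega
  rw [hj', pvSliceRev q (j - 1) (by omega), PySem.List.slice_from_natCast]
  simp only [Option.getD_some]
  have hjj : j - 1 + 1 = j := by omega
  rw [hjj, pvZipRevTakeDrop q j (le_of_lt h2)]
  rw [pvMixABody, PySem.List.foldl_add]
  rw [zero_add, List.map_map]
  congr 1

-- filter of a step-2 b-range for the single b with a + b = j (parity hypothesis on s)
theorem pvFilt (a j : Nat) : ∀ (len s : Nat), (j + s + a) % 2 = 0 →
    (List.range' s len 2).filter (fun b => a + b == j)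
      = if a + s ≤ j ∧ j < a + (s + 2 * len) then [j - a] else [] := by
  intro len
  induction len with
  | zero => intro s _; rw [if_neg (by omega)]; rfl
  | succ len ih =>
      intro s hpar
      rw [List.range'_succ, List.filter_cons, ih (s + 2) (by omega)]
      by_cases hs : a + s = j
      · have hbeq : (a + s == j) = true := by simpa using hs
        rw [if_pos hbeq, if_neg (by omega), if_pos (by omega)]
        have hsj : s = j - a := by omega
        rw [hsj]
      · have hbeq : (a + s == j) = false := by simpa using hs
        rw [if_neg (by simp [hbeq])]
        by_cases hc : a + (s + 2) ≤ j ∧ j < a + (s + 2 + 2 * len)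
        · rw [if_pos hc, if_pos (by omega)]
        · rw [if_neg hc, if_neg (by omega)]

theorem pvGetD_set_self (d : List Int) (k : Nat) (v : Int) (h : k < d.length) :
    (d.set k v).getD k 0 = v := by
  simp [List.getD, h]

theorem pvGetD_set_ne (d : List Int) (k j : Nat) (v : Int) (h : k ≠ j) :
    (d.set k v).getD j 0 = d.getD j 0 := by
  simp [List.getD, h]

-- the set-fold over any pair list, read back through getD
theorem pvFoldSetPairs (v : Nat → Nat → Int) : ∀ (ps : List (Nat × Nat)) (d : List Int),
    (∀ ab ∈ ps, ab.1 + ab.2 < d.length) →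
    (ps.foldl (fun d ab => d.set (ab.1 + ab.2) (d.getD (ab.1 + ab.2) 0 + v ab.1 ab.2)) d).length = d.length ∧
    ∀ j, (ps.foldl (fun d ab => d.set (ab.1 + ab.2) (d.getD (ab.1 + ab.2) 0 + v ab.1 ab.2)) d).getD j 0
        = d.getD j 0 + ((ps.filter (fun ab => ab.1 + ab.2 == j)).map (fun ab => v ab.1 ab.2)).sum := by
  intro ps
  induction ps with
  | nil => intro d _; exact ⟨rfl, by simp⟩
  | cons ab t ih =>
      intro d hd
      have hab : ab.1 + ab.2 < d.length := hd ab (List.mem_cons_self ..)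
      have hlen : (d.set (ab.1 + ab.2) (d.getD (ab.1 + ab.2) 0 + v ab.1 ab.2)).length = d.length := by
        simp
      obtain ⟨ihl, ihg⟩ := ih (d.set (ab.1 + ab.2) (d.getD (ab.1 + ab.2) 0 + v ab.1 ab.2))
        (by intro x hx; rw [hlen]; exact hd x (List.mem_cons_of_mem _ hx))
      constructor
      · simpa [hlen] using ihl
      · intro j
        simp only [List.foldl_cons] at ihg ⊢
        rw [ihg j, List.filter_cons]
        by_cases hj : ab.1 + ab.2 = j
        · simp only [hj, beq_self_eq_true, if_pos, List.map_cons, List.sum_cons]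
          rw [pvGetD_set_self d j _ (by omega)]
          ring
        · have hd' : ((ab.1 + ab.2 == j) : Bool) = false := by
            simp only [beq_eq_false_iff_ne]; omega
          simp only [hd', Bool.false_eq_true, if_false]
          congr 1
          exact pvGetD_set_ne d (ab.1 + ab.2) j _ hj

-- all ordered pairs a < b of row indices, as B's nested loops enumerate them
def pvAllPairs (n : Nat) : List (Nat × Nat) :=
  (List.range n).flatMap (fun a => (List.range' (a + 1) ((n - (a + 1) + 1) / 2) 2).map (fun b => (a, b)))

theorem pvDiagB_eq_foldPairs (q : List (List Char)) :
    pvDiagB q = (pvAllPairs q.length).foldl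
      (fun d ab => d.set (ab.1 + ab.2) (d.getD (ab.1 + ab.2) 0 + pvHamB (q.getD ab.1 []) (q.getD ab.2 [])))
      (List.replicate (2 * q.length) 0) := by
  unfold pvDiagB pvAllPairs
  rw [List.foldl_flatMap]
  congr 1
  funext d a
  rw [List.foldl_map]

theorem pvDiagB_getD (q : List (List Char)) (j : Nat) :
    (pvDiagB q).getD j 0
      = (((pvAllPairs q.length).filter (fun ab => ab.1 + ab.2 == j)).map
          (fun ab => pvHamB (q.getD ab.1 []) (q.getD ab.2 []))).sum := by
  rw [pvDiagB_eq_foldPairs]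
  have := (pvFoldSetPairs (fun a b => pvHamB (q.getD a []) (q.getD b []))
    (pvAllPairs q.length) (List.replicate (2 * q.length) 0) ?_).2 j
  · rw [this]
    simp
  · intro ab hab
    unfold pvAllPairs at hab
    rw [List.mem_flatMap] at hab
    obtain ⟨a, ha, hb⟩ := hab
    rw [List.mem_map] at hb
    obtain ⟨b, hb, rfl⟩ := hb
    rw [List.mem_range] at ha
    rw [List.mem_range'] at hb
    obtain ⟨t, ht, rfl⟩ := hb
    simp only [List.length_replicate]
    omega

-- sum over range n of an if-guarded term = sum over the middle window
theorem pvSumSplit (n lo m : Nat) (h : lo + m ≤ n) (f : Nat → Int)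
    (h0 : ∀ a, a < lo → f a = 0) (h1 : ∀ a, lo + m ≤ a → a < n → f a = 0) :
    ((List.range n).map f).sum = ((List.range' lo m).map f).sum := by
  have hsplit : List.range n = List.range' 0 lo ++ List.range' lo m ++ List.range' (lo + m) (n - (lo + m)) := by
    have e1 : List.range' lo m ++ List.range' (lo + m) (n - (lo + m)) = List.range' lo (m + (n - (lo + m))) := by
      simp
    have e2 : List.range' 0 lo ++ List.range' lo (m + (n - (lo + m))) = List.range' 0 (lo + (m + (n - (lo + m)))) := by
      simpa using (List.range'_append (s := 0) (m := lo) (n := m + (n - (lo + m))) (step := 1))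
    rw [List.range_eq_range', List.append_assoc, e1, e2]
    congr 1
    omega
  rw [hsplit, List.map_append, List.map_append, List.sum_append, List.sum_append]
  have hz0 : ((List.range' 0 lo).map f).sum = 0 := by
    apply List.sum_eq_zero
    intro x hx
    rw [List.mem_map] at hx
    obtain ⟨a, ha, rfl⟩ := hx
    rw [List.mem_range'_1] at ha
    exact h0 a (by omega)
  have hz1 : ((List.range' (lo + m) (n - (lo + m))).map f).sum = 0 := by
    apply List.sum_eq_zero
    intro x hx
    rw [List.mem_map] at hx
    obtain ⟨a, ha, rfl⟩ := hx
    rw [List.mem_range'_1] at ha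
    exact h1 a (by omega) (by omega)
  rw [hz0, hz1]
  ring

theorem pvSumRev (m : Nat) (f g : Nat → Int) (h : ∀ t, t < m → g t = f (m - 1 - t)) :
    ((List.range m).map f).sum = ((List.range m).map g).sum := by
  have : (List.range m).map g = ((List.range m).map f).reverse := by
    apply List.ext_getElem
    · simp
    · intro t ht1 ht2
      simp only [List.getElem_map, List.getElem_range, List.getElem_reverse,
        List.length_map, List.length_range]
      rw [h t (by simpa using ht1)]
  rw [this, List.sum_reverse]

-- the diagonal entry 2i-1 is exactly A's mirror mismatch count at split i
theorem pvDiag_entry (q : List (List Char)) (i : Nat) (h1 : 1 ≤ i) (h2 : i < q.length) :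
    (pvDiagB q).getD (2 * i - 1) 0 = pvMixA q (i : Int) := by
  set n := q.length with hn
  set m := min i (n - i) with hm
  set lo := i - m with hlo
  set j := 2 * i - 1 with hj
  set v : Nat → Nat → Int := fun a b => pvHamB (q.getD a []) (q.getD b []) with hv
  rw [pvDiagB_getD, pvMixA_eq q i h1 h2]
  unfold pvAllPairs
  rw [List.filter_flatMap]
  rw [List.map_flatMap, List.flatMap_def, List.sum_flatten, List.map_map]
  -- per-a contribution
  have hstep : ∀ a ∈ List.range n,
      (List.sum ∘ fun a =>
        (((List.range' (a + 1) ((n - (a + 1) + 1) / 2) 2).map (fun b => (a, b))).filter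
            (fun ab => ab.1 + ab.2 == j)).map (fun ab => v ab.1 ab.2)) a
        = (fun a => if a + (a + 1) ≤ j ∧ j < a + n then v a (j - a) else 0) a := by
    intro a ha
    rw [List.mem_range] at ha
    simp only [Function.comp_apply, List.filter_map, List.map_map]
    have hpred : ((fun ab : Nat × Nat => ab.1 + ab.2 == j) ∘ fun b => (a, b))
        = fun b => a + b == j := by
      funext b; simp
    rw [hpred, pvFilt a j ((n - (a + 1) + 1) / 2) (a + 1) (by omega)]
    by_cases hc : a + (a + 1) ≤ j ∧ j < a + (a + 1 + 2 * ((n - (a + 1) + 1) / 2))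
    · rw [if_pos hc, if_pos (by omega)]
      simp
    · rw [if_neg hc, if_neg (by omega)]
      simp
  rw [List.map_congr_left hstep]
  have hlom : lo + m = i := by omega
  rw [pvSumSplit n lo m (by omega)
      (fun a => if a + (a + 1) ≤ j ∧ j < a + n then v a (j - a) else 0)
      (fun a ha => by
        show (if a + (a + 1) ≤ j ∧ j < a + n then v a (j - a) else 0) = 0
        rw [if_neg (by omega)])
      (fun a ha _ => by
        show (if a + (a + 1) ≤ j ∧ j < a + n then v a (j - a) else 0) = 0
        rw [if_neg (by omega)])]
  have hmid : (List.range' lo m).map (fun a => if a + (a + 1) ≤ j ∧ j < a + n then v a (j - a) else 0)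
      = (List.range m).map (fun t => v (lo + t) (j - (lo + t))) := by
    rw [List.range'_eq_map_range, List.map_map]
    apply List.map_congr_left
    intro t ht
    rw [List.mem_range] at ht
    show (if (lo + t) + ((lo + t) + 1) ≤ j ∧ j < (lo + t) + n then v (lo + t) (j - (lo + t)) else 0)
        = v (lo + t) (j - (lo + t))
    rw [if_pos (by omega)]
  rw [hmid]
  rw [pvSumRev m (fun t => v (lo + t) (j - (lo + t))) (fun k => v (i - 1 - k) (i + k))]
  intro t ht
  have e1 : i - 1 - t = lo + (m - 1 - t) := by omega
  have e2 : i + t = j - (lo + (m - 1 - t)) := by omega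
  rw [e1, e2]

-- the scanning loops agree index by index
theorem pvLoop_eq (q : List (List Char)) (errors : Int) (l : List Nat)
    (hl : ∀ j ∈ l, 1 ≤ j ∧ j < q.length) :
    pvCalcALoop q errors (l.map (fun j : Nat => (j : Int))) =
      pvScanDiag (pvDiagB q) errors l := by
  induction l with
  | nil => rfl
  | cons j rest ih =>
      obtain ⟨hj1, hj2⟩ := hl j (List.mem_cons_self ..)
      rw [List.map_cons]
      simp only [pvCalcALoop, pvScanDiag]
      have hcond : (pvMixA q (j : Int) = errors) ↔ ((pvDiagB q).getD (2 * j - 1) 0 = errors) := by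
        rw [pvDiag_entry q j hj1 hj2]
      rw [if_congr hcond rfl (ih (fun x hx => hl x (List.mem_cons_of_mem _ hx)))]

theorem pvCalc_eq (q : List (List Char)) (errors : Int) : pvCalcA q errors = pvCalcB q errors := by
  unfold pvCalcA pvCalcB
  have hr : PySem.List.pyRange 1 (q.length : Int) 1
      = (List.range' 1 (q.length - 1)).map (fun j : Nat => (j : Int)) := by
    rw [PySem.List.pyRange_one, List.range'_eq_map_range, List.map_map]
    have ht : ((q.length : Int) - 1).toNat = q.length - 1 := by omega
    rw [ht]
    apply List.map_congr_left
    intro k _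
    simp only [Function.comp_apply]
    push_cast
    ring
  rw [hr]
  apply pvLoop_eq q errors
  intro j hj
  rw [List.mem_range'_1] at hj
  omega

-- ===== VERDICT (by name: the statement is the Claim_ definition above) =====
theorem first_puzzle_spec : Claim_equal_first_puzzle := by
  intro patterns errors _
  unfold Spec_first_puzzle first_puzzle first_puzzle_alt
  refine congrArg List.sum (List.map_congr_left ?_)
  intro p _
  rw [pvCalc_eq, pvCalc_eq]
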